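-- pv_equiv track=rewrite | github.com/olegs32/P2P_Core | dist/services/hash_worker/hash_computer_workers.py | apply_mutations
-- ===== SOURCE A (Python) =====
-- from typing import List, Tuple, Optional
--
-- def apply_mutations(word: str, rules: List[str]) -> List[str]:
--     """
--     Применяет правила мутации к слову
--
--     Правила:
--     - l: lowercase
--     - u: uppercase
--     - c: capitalize
--     - $X: append character X
--     - ^X: prepend character X
--     - sa@: substitute 'a' with '@'
--     - d: duplicate
--     - r: reverse
--     """
--     mutations = [word]
--
--     for rule in rules:
--         new_mutations = []
--
--         for w in mutations:
--             if rule == "l":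
--                 new_mutations.append(w.lower())
--             elif rule == "u":
--                 new_mutations.append(w.upper())
--             elif rule == "c":
--                 new_mutations.append(w.capitalize())
--             elif rule == "d":
--                 new_mutations.append(w + w)
--             elif rule == "r":
--                 new_mutations.append(w[::-1])
--             elif rule.startswith("$"):
--                 # Append
--                 new_mutations.append(w + rule[1:])
--             elif rule.startswith("^"):
--                 # Prepend
--                 new_mutations.append(rule[1:] + w)
--             elif rule.startswith("s"):
--                 # Substitute: sab = replace 'a' with 'b'
--                 if len(rule) == 3:
--                     new_mutations.append(w.replace(rule[1], rule[2]))
--             else: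
--                 new_mutations.append(w)
--
--         mutations = new_mutations
--
--     return mutations
-- ===== SOURCE B (Python) =====
-- def _compile(rule):
--     """Compile one rule into a string->string function, or None for a
--     malformed substitute rule (starts with 's' but not exactly 3 chars)."""
--     if rule == "l":
--         return str.lower
--     if rule == "u":
--         return str.upper
--     if rule == "c":
--         return str.capitalize
--     if rule == "d":
--         return lambda w: w + w
--     if rule == "r":
--         return lambda w: w[::-1]
--     if rule.startswith("$"):
--         suffix = rule[1:]
--         return lambda w: w + suffix
--     if rule.startswith("^"):
--         prefix = rule[1:]
--         return lambda w: prefix + w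
--     if rule.startswith("s"):
--         if len(rule) == 3:
--             old, new = rule[1], rule[2]
--             return lambda w: w.replace(old, new)
--         return None
--     return lambda w: w
--
--
-- def apply_mutations(word, rules):
--     # Phase 1: compile the rule list into a pipeline of functions;
--     # a malformed substitute rule drops the word, so the result is [].
--     pipeline = []
--     for rule in rules:
--         f = _compile(rule)
--         if f is None:
--             return []
--         pipeline.append(f)
--     # Phase 2: run the word through the compiled pipeline.
--     for f in pipeline:
--         word = f(word)
--     return [word]
-- ===== Notes on version B (the rewrite author's own statement) =====
-- stated objective: alternative
-- what changed: B compiles the rule list once into a pipeline of string->string functions (returning [] immediately on a malformed substitute rule) and then runs the word through the compiled pipeline, instead of A's per-rule rebuild of a list of mutations with a nested loop.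
import Mathlib
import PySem

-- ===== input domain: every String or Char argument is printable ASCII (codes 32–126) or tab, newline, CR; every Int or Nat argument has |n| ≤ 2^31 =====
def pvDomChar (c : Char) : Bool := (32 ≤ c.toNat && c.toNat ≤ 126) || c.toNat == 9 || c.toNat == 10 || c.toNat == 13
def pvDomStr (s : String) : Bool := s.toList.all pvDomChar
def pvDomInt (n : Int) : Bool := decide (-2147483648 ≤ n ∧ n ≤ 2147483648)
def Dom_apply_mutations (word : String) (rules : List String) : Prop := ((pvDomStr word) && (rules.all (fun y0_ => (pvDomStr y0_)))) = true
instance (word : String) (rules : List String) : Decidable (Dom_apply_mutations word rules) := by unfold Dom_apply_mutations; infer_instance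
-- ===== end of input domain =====

-- B compiles the rules once into a pipeline of ops (early [] on a malformed substitute rule) and then runs the word through it, replacing A's nested rebuild of a mutations list (alternative decomposition; return value only).


-- ===== PORT A =====
-- w.capitalize(): first char uppercased, rest lowercased — exact on the ASCII domain (ported by hand; PySem has no capitalize)
def pvCapitalize (w : String) : String :=
  match w.toList with
  | [] => ""
  | c :: cs => String.ofList (PySem.Chars.upperChar c :: PySem.Chars.lower cs)

-- the body of A's inner 'for w in mutations' loop (one append, or a skip for a malformed substitute rule)
def pvStepA (rule : String) (nm : List String) (w : String) : List String :=
  if rule = "l" then nm ++ [PySem.Str.lower w]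
  else if rule = "u" then nm ++ [PySem.Str.upper w]
  else if rule = "c" then nm ++ [pvCapitalize w]
  else if rule = "d" then nm ++ [w ++ w]
  else if rule = "r" then nm ++ [(PySem.Str.slice? w none none (-1)).getD w]  -- w[::-1]; step -1 ≠ 0 so slice? is some: exact
  else if PySem.Str.startswith rule "$" then nm ++ [w ++ PySem.Str.slice rule (some 1) none]
  else if PySem.Str.startswith rule "^" then nm ++ [PySem.Str.slice rule (some 1) none ++ w]
  else if PySem.Str.startswith rule "s" then
    (if PySem.Str.len rule = 3 then
      -- rule[1], rule[2]: in range under the len = 3 guard, so getD never fires: exact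
      nm ++ [PySem.Str.replace w (String.singleton ((PySem.Str.pyGet? rule 1).getD ' '))
                                 (String.singleton ((PySem.Str.pyGet? rule 2).getD ' '))]
     else nm)
  else nm ++ [w]

def apply_mutations (word : String) (rules : List String) : List String :=
  rules.foldl (fun mutations rule => mutations.foldl (pvStepA rule) []) [word]

-- ===== PORT B =====
-- Source B's closures rendered as data: one constructor per kind of compiled function
inductive PvOp where
  | lower | upper | cap | dup | rev
  | app (s : String) | pre (s : String)
  | sub (a b : Char) | idOp
deriving DecidableEq, Repr

-- _compile from Source B: rule → pipeline stage, none = malformed substitute rule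
def pvCompile (rule : String) : Option PvOp :=
  if rule = "l" then some .lower
  else if rule = "u" then some .upper
  else if rule = "c" then some .cap
  else if rule = "d" then some .dup
  else if rule = "r" then some .rev
  else if PySem.Str.startswith rule "$" then some (.app (PySem.Str.slice rule (some 1) none))
  else if PySem.Str.startswith rule "^" then some (.pre (PySem.Str.slice rule (some 1) none))
  else if PySem.Str.startswith rule "s" then
    (if PySem.Str.len rule = 3 then
      some (.sub ((PySem.Str.pyGet? rule 1).getD ' ') ((PySem.Str.pyGet? rule 2).getD ' '))
     else none)
  else some .idOp

-- running one compiled stage (the body of each closure in Source B)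
def pvRunOp (op : PvOp) (w : String) : String :=
  match op with
  | .lower => PySem.Str.lower w
  | .upper => PySem.Str.upper w
  | .cap => pvCapitalize w
  | .dup => w ++ w
  | .rev => (PySem.Str.slice? w none none (-1)).getD w
  | .app s => w ++ s
  | .pre s => s ++ w
  | .sub a b => PySem.Str.replace w (String.singleton a) (String.singleton b)
  | .idOp => w

-- phase 1 of Source B: compile the whole rule list, early exit (none) on a malformed rule
def pvCompileAll : List String → Option (List PvOp)
  | [] => some []
  | r :: rs =>
    match pvCompile r with
    | none => none
    | some op => (pvCompileAll rs).map (op :: ·)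

def apply_mutations_alt (word : String) (rules : List String) : List String :=
  match pvCompileAll rules with
  | none => []
  | some pipeline => [pipeline.foldl (fun w op => pvRunOp op w) word]

-- ===== PRECONDITION & SPEC =====
def Spec_apply_mutations (word : String) (rules : List String) (out : List String) : Prop := out = apply_mutations_alt word rules
instance (word : String) (rules : List String) (out : List String) : Decidable (Spec_apply_mutations word rules out) := by unfold Spec_apply_mutations; infer_instance

-- ===== CLAIM (what is proved, stated in full; the proofs are below) =====
def Claim_equal_apply_mutations : Prop := ∀ (word : String) (rules : List String), Dom_apply_mutations word rules → Spec_apply_mutations word rules (apply_mutations word rules)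

-- ===== LEMMAS AND PROOFS =====
-- A's inner loop on a singleton = one compiled stage (or the drop)
theorem pvStepA_singleton (rule w : String) :
    pvStepA rule [] w =
      (match pvCompile rule with
       | none => []
       | some op => [pvRunOp op w]) := by
  unfold pvStepA pvCompile
  split_ifs <;> rfl

-- once A's mutations list is empty it stays empty
theorem pvFoldA_nil (rules : List String) :
    rules.foldl (fun mutations rule => mutations.foldl (pvStepA rule) []) [] = [] := by
  induction rules with
  | nil => rfl
  | cons r rs ih => simpa using ih

theorem pvMain (rules : List String) (word : String) :
    rules.foldl (fun mutations rule => mutations.foldl (pvStepA rule) []) [word] =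
      apply_mutations_alt word rules := by
  induction rules generalizing word with
  | nil => rfl
  | cons r rs ih =>
    simp only [List.foldl_cons, List.foldl_nil]
    rw [pvStepA_singleton]
    cases hc : pvCompile r with
    | none =>
      simp only [pvFoldA_nil]
      unfold apply_mutations_alt pvCompileAll
      rw [hc]
    | some op =>
      rw [ih (pvRunOp op word)]
      have h3 : pvCompileAll (r :: rs) = (pvCompileAll rs).map (op :: ·) := by
        simp [pvCompileAll, hc]
      unfold apply_mutations_alt
      rw [h3]
      cases pvCompileAll rs <;> simp

-- ===== VERDICT (by name: the statement is the Claim_ definition above) =====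
theorem apply_mutations_spec : Claim_equal_apply_mutations := by
  intro word rules _
  unfold Spec_apply_mutations apply_mutations
  exact pvMain rules word
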